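-- pv_equiv track=rewrite | github.com/iecse/EulerSphere_TechTatva2025 | Round1/Abhyuday Gupta/08. DigitalRootChain/DigitalRootChain.py | chain_length
-- ===== SOURCE A (Python) =====
-- def chain_length(n):
--     seen = set()
--     current = n
--     length = 1
--
--     while current >= 10:
--         if current in seen:
--             return -1
--         seen.add(current)
--         current = digital_transformation(current)
--         length += 1
--
--     return length
--
-- def digital_transformation(n):
--     digits = str(n)
--     total = 0
--     for i, digit in enumerate(reversed(digits)):
--         position = i + 1
--         total += int(digit) * position
--     return total
-- ===== SOURCE B (Python) =====
-- def chain_length(n):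
--     # Recursive chain count with arithmetic digit extraction: any value the
--     # helper is ever applied to is a multi-digit nonnegative int, so divmod digit peeling
--     # computes exactly the same weighted digit sum as the str-based helper.
--     if n < 10:
--         return 1
--     total = 0
--     m = n
--     pos = 1
--     while m > 0:
--         m, d = divmod(m, 10)
--         total += d * pos
--         pos += 1
--     return 1 + chain_length(total)
-- ===== Notes on version B (the rewrite author's own statement) =====
-- stated objective: alternative
-- what changed: B replaces A's str-based digit helper plus visited-set while loop with a recursive chain count that peels digits arithmetically via divmod (no string conversion, no seen set, no cycle-detection branch), justified by a proved lemma that the weighted digit sum of any multi-digit value is a smaller nonnegative int, so the chain strictly decreases and never cycles.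
import Mathlib
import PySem

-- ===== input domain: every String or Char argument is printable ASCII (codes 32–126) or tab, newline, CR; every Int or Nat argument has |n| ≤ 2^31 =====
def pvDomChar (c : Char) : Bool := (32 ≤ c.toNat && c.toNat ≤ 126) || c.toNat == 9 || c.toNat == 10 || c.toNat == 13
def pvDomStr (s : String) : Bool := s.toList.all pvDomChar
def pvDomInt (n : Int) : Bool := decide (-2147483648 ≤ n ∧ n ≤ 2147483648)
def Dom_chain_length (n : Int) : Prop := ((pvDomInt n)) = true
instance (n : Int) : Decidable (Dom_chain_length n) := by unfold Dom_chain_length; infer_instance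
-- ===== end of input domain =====

-- B replaces A's str-based helper + visited-set loop by a recursive chain count that
-- peels digits arithmetically with divmod; a proved strict-decrease lemma shows A's
-- cycle-detection branch is unreachable, so the two always agree.


-- ===== PORT A =====
-- module-level helper digital_transformation of the Python source.
-- int(digit) is ported as (PySem.Int.ofChars? [c]).getD 0: inside chain_length the helper
-- is only ever called with current ≥ 10, where every character is a decimal digit and
-- ofChars? returns some, so the port is exact on every reached call.
def digital_transformation (n : Int) : Int :=
  let digits := PySem.Int.toChars n
  (PySem.List.enumerate digits.reverse).foldl
    (fun total p => total + (PySem.Int.ofChars? [p.2]).getD 0 * (p.1 + 1)) 0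

-- A's while loop, with the seen set and the cycle-detection branch; the Nat argument is
-- FUEL, a totality guard only: n.toNat + 1 iterations always suffice because the
-- transformation strictly decreases every current ≥ 10 (proved below the claim block)
def chain_loopA : Nat → PySem.Set Int → Int → Int → Int
  | 0, _, _, length => length
  | fuel + 1, seen, current, length =>
    if 10 ≤ current then
      if PySem.Set.contains seen current then -1
      else chain_loopA fuel (PySem.Set.add seen current) (digital_transformation current) (length + 1)
    else length

def chain_length (n : Int) : Int := chain_loopA (n.toNat + 1) PySem.Set.empty n 1

-- ===== PORT B =====
-- Source B's inner `while m > 0: m, d = divmod(m, 10); total += d * pos; pos += 1` loop;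
-- the Nat argument is fuel (m.toNat + 1 suffices: m // 10 < m for m > 0)
def pvWsumLoop : Nat → Int → Int → Int → Int
  | 0, _, _, total => total
  | fuel + 1, m, pos, total =>
    if 0 < m then
      pvWsumLoop fuel (PySem.Int.floordiv m 10) (pos + 1) (total + PySem.Int.mod m 10 * pos)
    else total

-- Source B's recursion: no seen set, no cycle branch, no string conversion (fuel as above)
def pvChainAltGo : Nat → Int → Int
  | 0, _ => 1
  | fuel + 1, n =>
    if 10 ≤ n then 1 + pvChainAltGo fuel (pvWsumLoop (n.toNat + 1) n 1 0)
    else 1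

def chain_length_alt (n : Int) : Int := pvChainAltGo (n.toNat + 1) n

-- ===== PRECONDITION & SPEC =====
def Spec_chain_length (n : Int) (out : Int) : Prop := out = chain_length_alt n
instance (n : Int) (out : Int) : Decidable (Spec_chain_length n out) := by unfold Spec_chain_length; infer_instance

-- ===== CLAIM (what is proved, stated in full; the proofs are below) =====
def Claim_equal_chain_length : Prop := ∀ (n : Int), Dom_chain_length n → Spec_chain_length n (chain_length n)

-- ===== LEMMAS AND PROOFS =====

-- value of one digit character, as port A computes it
def pvDigitVal (c : Char) : Int := (PySem.Int.ofChars? [c]).getD 0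

-- weighted digit sum of a (reversed-digits) char list whose first element gets weight s+1
def pvW : List Char → Int → Int
  | [], _ => 0
  | c :: cs, s => pvDigitVal c * (s + 1) + pvW cs (s + 1)

theorem pvW_foldl (cs : List Char) (s a : Int) :
    (PySem.List.enumerate cs s).foldl
      (fun total p => total + (PySem.Int.ofChars? [p.2]).getD 0 * (p.1 + 1)) a
    = a + pvW cs s := by
  induction cs generalizing s a with
  | nil => simp [PySem.List.enumerate_nil, pvW]
  | cons c cs ih =>
    rw [PySem.List.enumerate_cons]
    simp only [List.foldl_cons, ih, pvW, pvDigitVal]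
    ring

theorem pvDigitVal_digitChar (d : Nat) (hd : d < 10) :
    pvDigitVal (Nat.digitChar d) = (d : Int) := by
  interval_cases d <;> decide

theorem pvW_toDigits_le (m : Nat) :
    ∀ s : Int, 0 ≤ s →
      0 ≤ pvW ((Nat.toDigits 10 m).reverse) s ∧
      pvW ((Nat.toDigits 10 m).reverse) s ≤ (m : Int) * (s + 1) := by
  induction m using Nat.strong_induction_on with
  | _ m ih =>
    intro s hs
    by_cases hm : m < 10
    · rw [Nat.toDigits_of_lt_base hm]
      simp only [List.reverse_singleton, pvW, pvDigitVal_digitChar m hm]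
      constructor
      · positivity
      · nlinarith [Int.natCast_nonneg m]
    · push Not at hm
      rw [Nat.toDigits_of_base_le (by norm_num) hm, List.reverse_append, List.reverse_singleton]
      simp only [List.singleton_append, pvW,
        pvDigitVal_digitChar (m % 10) (Nat.mod_lt m (by norm_num))]
      have hdiv : m / 10 < m := Nat.div_lt_self (by omega) (by norm_num)
      obtain ⟨h0, h1⟩ := ih (m / 10) hdiv (s + 1) (by omega)
      have hmod : (↑(m / 10) : Int) * 10 + (↑(m % 10) : Int) = (m : Int) := by
        omega
      have hm0 : (0:Int) ≤ (↑(m % 10) : Int) := Int.natCast_nonneg _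
      have hd0 : (0:Int) ≤ (↑(m / 10) : Int) := Int.natCast_nonneg _
      constructor
      · nlinarith
      · nlinarith

theorem pvW_toDigits_lt (m : Nat) (hm : 10 ≤ m) :
    pvW ((Nat.toDigits 10 m).reverse) 0 < (m : Int) := by
  rw [Nat.toDigits_of_base_le (by norm_num) hm, List.reverse_append, List.reverse_singleton]
  simp only [List.singleton_append, pvW,
    pvDigitVal_digitChar (m % 10) (Nat.mod_lt m (by norm_num)), zero_add]
  obtain ⟨h0, h1⟩ := pvW_toDigits_le (m / 10) 1 (by norm_num)
  have hmod : (↑(m / 10) : Int) * 10 + (↑(m % 10) : Int) = (m : Int) := by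
    omega
  have hdpos : (1:Int) ≤ (↑(m / 10) : Int) := by
    exact_mod_cast (Nat.one_le_div_iff (by norm_num)).mpr hm
  nlinarith

theorem digital_transformation_lt (n : Int) (h : 10 ≤ n) :
    0 ≤ digital_transformation n ∧ digital_transformation n < n := by
  have hchars : PySem.Int.toChars n = Nat.toDigits 10 n.toNat := by
    unfold PySem.Int.toChars
    rw [if_neg (by omega)]
  have hcast : ((n.toNat : Nat) : Int) = n := Int.toNat_of_nonneg (by omega)
  have hge : 10 ≤ n.toNat := by omega
  unfold digital_transformation
  rw [hchars, pvW_foldl]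
  have h1 := (pvW_toDigits_le n.toNat 0 le_rfl).1
  have h2 := pvW_toDigits_lt n.toNat hge
  rw [hcast] at h2
  constructor
  · omega
  · omega

-- Source B's arithmetic inner loop computes exactly the string-based weighted digit sum
theorem pvWsumLoop_eq_pvW (fuel : Nat) :
    ∀ (m : Nat), 1 ≤ m → m ≤ fuel → ∀ (s t : Int),
      pvWsumLoop fuel (m : Int) (s + 1) t = t + pvW ((Nat.toDigits 10 m).reverse) s := by
  induction fuel with
  | zero => intro m hm hf; omega
  | succ fuel ih =>
    intro m hm hf s t
    have hfd : PySem.Int.floordiv (m : Int) 10 = ((m / 10 : Nat) : Int) := by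
      exact_mod_cast PySem.Int.floordiv_natCast m 10
    have hmd : PySem.Int.mod (m : Int) 10 = ((m % 10 : Nat) : Int) := by
      exact_mod_cast PySem.Int.mod_natCast m 10
    rw [pvWsumLoop, if_pos (by exact_mod_cast hm : (0:Int) < (m:Int)), hfd, hmd]
    by_cases h10 : m < 10
    · have hq : m / 10 = 0 := Nat.div_eq_of_lt h10
      have hr : m % 10 = m := Nat.mod_eq_of_lt h10
      rw [hq, hr, Nat.toDigits_of_lt_base h10]
      have hstop : pvWsumLoop fuel ((0 : Nat) : Int) (s + 1 + 1) (t + (m : Int) * (s + 1))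
          = t + (m : Int) * (s + 1) := by
        cases fuel with
        | zero => rw [pvWsumLoop]
        | succ fuel => rw [pvWsumLoop, if_neg (by norm_num)]
      rw [hstop]
      simp only [List.reverse_singleton, pvW, pvDigitVal_digitChar m h10]
      ring
    · push Not at h10
      have hdiv1 : 1 ≤ m / 10 := (Nat.one_le_div_iff (by norm_num)).mpr h10
      have hdlt : m / 10 < m := Nat.div_lt_self (by omega) (by norm_num)
      rw [ih (m / 10) hdiv1 (by omega) (s + 1) (t + ↑(m % 10) * (s + 1))]
      rw [Nat.toDigits_of_base_le (by norm_num) h10, List.reverse_append,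
        List.reverse_singleton, List.singleton_append]
      simp only [pvW, pvDigitVal_digitChar (m % 10) (Nat.mod_lt m (by norm_num))]
      ring

-- with sufficient fuel, Source B's inner loop equals A's helper on every n ≥ 10
theorem pvWsumLoop_eq_dt (fuel : Nat) (n : Int) (h : 10 ≤ n) (hf : n.toNat ≤ fuel) :
    pvWsumLoop fuel n 1 0 = digital_transformation n := by
  have hcast : ((n.toNat : Nat) : Int) = n := Int.toNat_of_nonneg (by omega)
  have hchars : PySem.Int.toChars n = Nat.toDigits 10 n.toNat := by
    unfold PySem.Int.toChars
    rw [if_neg (by omega)]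
  unfold digital_transformation
  rw [hchars, pvW_foldl]
  have := pvWsumLoop_eq_pvW fuel n.toNat (by omega) hf 0 0
  rw [hcast] at this
  simpa using this

-- A's loop with any harmless seen set equals length - 1 + B's recursive count,
-- for every pair of sufficient fuels
theorem chain_loopA_eq_alt (k : Nat) :
    ∀ (current : Int), current.toNat ≤ k →
    ∀ (fa fb : Nat), current.toNat < fa → current.toNat < fb →
    ∀ (seen : PySem.Set Int) (length : Int),
      (∀ s ∈ seen, current < s) →
      chain_loopA fa seen current length = length - 1 + pvChainAltGo fb current := by
  induction k with
  | zero =>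
    intro current hk fa fb hfa hfb seen length _
    have h10 : ¬ 10 ≤ current := by omega
    obtain ⟨fa, rfl⟩ := Nat.exists_eq_succ_of_ne_zero (by omega : fa ≠ 0)
    obtain ⟨fb, rfl⟩ := Nat.exists_eq_succ_of_ne_zero (by omega : fb ≠ 0)
    rw [chain_loopA, if_neg h10, pvChainAltGo, if_neg h10]
    ring
  | succ k ih =>
    intro current hk fa fb hfa hfb seen length hinv
    obtain ⟨fa, rfl⟩ := Nat.exists_eq_succ_of_ne_zero (by omega : fa ≠ 0)
    obtain ⟨fb, rfl⟩ := Nat.exists_eq_succ_of_ne_zero (by omega : fb ≠ 0)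
    by_cases h10 : 10 ≤ current
    · have hnot : PySem.Set.contains seen current ≠ true := by
        intro hc
        exact lt_irrefl current (hinv current ((PySem.Set.contains_iff seen current).mp hc))
      rw [chain_loopA, if_pos h10, if_neg (by simpa using hnot),
        pvChainAltGo, if_pos h10, pvWsumLoop_eq_dt (current.toNat + 1) current h10 (by omega)]
      obtain ⟨hd0, hdlt⟩ := digital_transformation_lt current h10
      have hdn : (digital_transformation current).toNat < current.toNat := by omega
      rw [ih (digital_transformation current) (by omega) fa fb (by omega) (by omega)
        _ (length + 1)
        (by
          intro s hs
          rcases (PySem.Set.mem_add seen current s).mp hs with h | h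
          · exact lt_trans hdlt (hinv s h)
          · rw [h]; exact hdlt)]
      ring
    · rw [chain_loopA, if_neg h10, pvChainAltGo, if_neg h10]
      ring

-- ===== VERDICT (by name: the statement is the Claim_ definition above) =====
theorem chain_length_spec : Claim_equal_chain_length := by
  intro n _
  unfold Spec_chain_length chain_length chain_length_alt
  rw [chain_loopA_eq_alt n.toNat n le_rfl (n.toNat + 1) (n.toNat + 1) (by omega) (by omega)
    PySem.Set.empty 1 (by intro s hs; simp [PySem.Set.empty] at hs)]
  ring
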